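-- pv_equiv track=rewrite | github.com/isma-elam/nlp_research_project | scripts/feature_extract.py | _match_presence_pruned
-- ===== SOURCE A (Python) =====
-- from typing import Dict, List, Set, Tuple
--
-- LEVELS = ["N5", "N4", "N3", "N2", "N1"]
--
-- LEVEL_RANK = {"N1": 1, "N2": 2, "N3": 3, "N4": 4, "N5": 5}
--
-- def _keep_longest_non_substrings(strings: List[str]) -> List[str]:
--     strings_sorted = sorted(strings, key=len, reverse=True)
--     kept: List[str] = []
--     for s in strings_sorted:
--         if any(s in longer for longer in kept):
--             continue
--         kept.append(s)
--     return kept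
--
-- def _match_presence_pruned(text: str, pairs: List[Tuple[str, str]]) -> Tuple[Dict[str, int], Dict[str, List[str]]]:
--     matched: Dict[str, str] = {}
--     for token, level in pairs:
--         if token in text:
--             prev = matched.get(token)
--             if prev is None or LEVEL_RANK[level] < LEVEL_RANK[prev]:
--                 matched[token] = level
--
--     kept = _keep_longest_non_substrings(list(matched.keys()))
--     counts: Dict[str, int] = dict.fromkeys(LEVELS, 0)  # type: ignore[assignment]
--     by_level: Dict[str, List[str]] = {lvl: [] for lvl in LEVELS}
--     for token in kept:
--         lvl = matched[token]
--         counts[lvl] += 1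
--         by_level[lvl].append(token)
--     # Sortie déterministe (utile pour les diffs)
--     for lvl in LEVELS:
--         by_level[lvl] = sorted(by_level[lvl], key=len, reverse=True)
--     return counts, by_level
-- ===== SOURCE B (Python) =====
-- from typing import Dict, List, Tuple
--
-- LEVELS = ["N5", "N4", "N3", "N2", "N1"]
--
-- LEVEL_RANK = {"N1": 1, "N2": 2, "N3": 3, "N4": 4, "N5": 5}
--
-- def _match_presence_pruned(text: str, pairs: List[Tuple[str, str]]) -> Tuple[Dict[str, int], Dict[str, List[str]]]:
--     best: Dict[str, str] = {}
--     for token, level in pairs: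
--         if token in text and (token not in best or LEVEL_RANK[level] < LEVEL_RANK[best[token]]):
--             best[token] = level
--     toks = sorted(best, key=len, reverse=True)
--     # a token survives pruning iff it is not a substring of any OTHER matched token
--     kept = [t for t in toks if not any(t != u and t in u for u in toks)]
--     by_level = {lvl: [t for t in kept if best[t] == lvl] for lvl in LEVELS}
--     counts = {lvl: len(ts) for lvl, ts in by_level.items()}
--     return counts, by_level
-- ===== Notes on version B (the rewrite author's own statement) =====
-- stated objective: simpler
-- what changed: B replaces A's sort-then-iteratively-accumulate pruning loop by a direct 'not a substring of any other matched token' filter over the sorted token list, and builds by_level/counts by per-level comprehensions instead of A's single mutating pass over two dicts followed by a per-level re-sort.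
import Mathlib
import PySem

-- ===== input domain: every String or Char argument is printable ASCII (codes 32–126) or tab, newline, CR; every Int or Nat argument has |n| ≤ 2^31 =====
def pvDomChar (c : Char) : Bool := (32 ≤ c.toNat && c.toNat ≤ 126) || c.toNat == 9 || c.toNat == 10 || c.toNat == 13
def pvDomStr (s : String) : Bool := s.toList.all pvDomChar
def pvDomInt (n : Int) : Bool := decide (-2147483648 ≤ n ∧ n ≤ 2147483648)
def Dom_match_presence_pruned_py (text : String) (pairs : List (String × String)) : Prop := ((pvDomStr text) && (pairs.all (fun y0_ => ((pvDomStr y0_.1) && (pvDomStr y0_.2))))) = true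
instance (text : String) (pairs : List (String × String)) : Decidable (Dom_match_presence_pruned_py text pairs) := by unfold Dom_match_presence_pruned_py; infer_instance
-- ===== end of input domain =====

-- B replaces A's iterative pruning accumulator by a direct maximality filter and the
-- mutating counting pass + re-sort by per-level comprehensions; objective: simpler (same cost).

-- ===== PORT A =====
def pvLEVELS : List String := ["N5", "N4", "N3", "N2", "N1"]

def pvLEVEL_RANK : PySem.Dict String Int :=
  PySem.Dict.ofList [("N1", 1), ("N2", 2), ("N3", 3), ("N4", 4), ("N5", 5)]

-- LEVEL_RANK[s]; the KeyError case (s not a level) is excluded by Pre_, default 0 is never hit there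
def pvRank (s : String) : Int := pvLEVEL_RANK.getD s 0

def pvKeepLongestNonSubstrings (strings : List String) : List String :=
  let ss := PySem.List.sorted strings PySem.Str.len true
  ss.foldl (fun kept s =>
    if kept.any (fun longer => PySem.Str.isIn s longer) then kept else kept ++ [s]) []

def pvMatchStepA (text : String) (m : PySem.Dict String String) (p : String × String) :
    PySem.Dict String String :=
  if PySem.Str.isIn p.1 text then
    match m.get? p.1 with
    | none => m.insert p.1 p.2
    | some prev => if pvRank p.2 < pvRank prev then m.insert p.1 p.2 else m
  else m

def match_presence_pruned_py (text : String) (pairs : List (String × String)) :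
    (List (String × Int)) × (List (String × List String)) :=
  let matched := pairs.foldl (pvMatchStepA text) PySem.Dict.empty
  let kept := pvKeepLongestNonSubstrings matched.keys
  let counts0 : PySem.Dict String Int := pvLEVELS.foldl (fun d l => d.insert l 0) PySem.Dict.empty
  let byLevel0 : PySem.Dict String (List String) :=
    pvLEVELS.foldl (fun d l => d.insert l []) PySem.Dict.empty
  -- counts[lvl] += 1 / by_level[lvl].append(token); KeyError (lvl ∉ LEVELS) is excluded by Pre_
  let cb := kept.foldl (fun (cb : PySem.Dict String Int × PySem.Dict String (List String)) token =>
      ((cb.1.modify (matched.getD token "") 0 (fun x => x + 1)),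
       (cb.2.modify (matched.getD token "") [] (fun x => x ++ [token])))) (counts0, byLevel0)
  let byLevel := pvLEVELS.foldl
    (fun d l => d.insert l (PySem.List.sorted (d.getD l []) PySem.Str.len true)) cb.2
  (cb.1.items, byLevel.items)

-- ===== PORT B =====
def pvBestStepB (text : String) (m : PySem.Dict String String) (p : String × String) :
    PySem.Dict String String :=
  if PySem.Str.isIn p.1 text && (!(m.contains p.1) || decide (pvRank p.2 < pvRank (m.getD p.1 ""))) then
    m.insert p.1 p.2
  else m

def match_presence_pruned_py_alt (text : String) (pairs : List (String × String)) :
    (List (String × Int)) × (List (String × List String)) :=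
  let best := pairs.foldl (pvBestStepB text) PySem.Dict.empty
  let toks := PySem.List.sorted best.keys PySem.Str.len true
  let kept := toks.filter (fun t => !(toks.any (fun u => t != u && PySem.Str.isIn t u)))
  let byLevel := pvLEVELS.map (fun l => (l, kept.filter (fun t => best.getD t "" == l)))
  let counts := byLevel.map (fun p => (p.1, (p.2.length : Int)))
  (counts, byLevel)

-- ===== PRECONDITION & SPEC =====
-- Pre_ excludes inputs having a pair whose token occurs in text but whose level is not one of
-- N1..N5: on those A raises KeyError, except when that token is shadowed by a longer matched
-- token, where both programs return the same value anyway.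
def Pre_match_presence_pruned_py (text : String) (pairs : List (String × String)) : Prop :=
  ∀ p ∈ pairs, PySem.Str.isIn p.1 text = true → p.2 ∈ pvLEVELS
instance (text : String) (pairs : List (String × String)) :
    Decidable (Pre_match_presence_pruned_py text pairs) := by
  unfold Pre_match_presence_pruned_py; infer_instance

def pvWitness_match_presence_pruned_py : String × (List (String × String)) :=
  ("abc ab", [("ab", "N4"), ("ab", "N5"), ("bc", "N1"), ("zz", "XX")])

def Spec_match_presence_pruned_py (text : String) (pairs : List (String × String)) (out : (List (String × Int)) × (List (String × List String))) : Prop := out = match_presence_pruned_py_alt text pairs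
instance (text : String) (pairs : List (String × String)) (out : (List (String × Int)) × (List (String × List String))) : Decidable (Spec_match_presence_pruned_py text pairs out) := by unfold Spec_match_presence_pruned_py; infer_instance

-- ===== CLAIM (what is proved, stated in full; the proofs are below) =====
def Claim_equal_match_presence_pruned_py : Prop := ∀ (text : String) (pairs : List (String × String)), Dom_match_presence_pruned_py text pairs → Pre_match_presence_pruned_py text pairs → Spec_match_presence_pruned_py text pairs (match_presence_pruned_py text pairs)

-- ===== LEMMAS AND PROOFS =====

-- the two first loops are the same function on dictionaries
theorem pvStep_eq (text : String) : pvMatchStepA text = pvBestStepB text := by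
  funext m p
  unfold pvMatchStepA pvBestStepB
  cases hin : PySem.Str.isIn p.1 text with
  | false => simp [hin]
  | true =>
    cases hg : m.get? p.1 with
    | none =>
      simp [PySem.Dict.contains_eq_isSome_get?, hg]
    | some prev =>
      simp [PySem.Dict.contains_eq_isSome_get?, hg, PySem.Dict.getD_eq_get?_getD]

-- keys stay unique through B's first loop
theorem pvNodupKeysB (text : String) (pairs : List (String × String))
    (d : PySem.Dict String String) (h : d.keys.Nodup) :
    (pairs.foldl (pvBestStepB text) d).keys.Nodup := by
  induction pairs generalizing d with
  | nil => exact h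
  | cons p ps ih =>
    refine ih _ ?_
    unfold pvBestStepB
    split
    · exact PySem.Dict.nodup_keys_insert _ _ _ h
    · exact h

-- every stored level comes from a pair whose token is in the text, hence (under Pre_) is a level
theorem pvLevelsB (text : String) (pairs : List (String × String))
    (d : PySem.Dict String String)
    (hpre : ∀ p ∈ pairs, PySem.Str.isIn p.1 text = true → p.2 ∈ pvLEVELS)
    (hd : ∀ t l, d.get? t = some l → l ∈ pvLEVELS) :
    ∀ t l, (pairs.foldl (pvBestStepB text) d).get? t = some l → l ∈ pvLEVELS := by
  induction pairs generalizing d with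
  | nil => exact hd
  | cons p ps ih =>
    refine ih _ (fun q hq => hpre q (List.mem_cons_of_mem _ hq)) ?_
    intro t l hl
    unfold pvBestStepB at hl
    split at hl
    case isTrue hcond =>
      rw [PySem.Dict.get?_insert] at hl
      split at hl
      · cases hl
        rw [Bool.and_eq_true] at hcond
        exact hpre p List.mem_cons_self hcond.1
      · exact hd _ _ hl
    case isFalse => exact hd _ _ hl

-- B's pruning predicate: t is not a substring of any OTHER element of L
def pvPb (L : List String) (t : String) : Bool :=
  !(L.any (fun u => t != u && PySem.Str.isIn t u))

-- A's pruning accumulator step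
def pvStepK (kept : List String) (s : String) : List String :=
  if kept.any (fun longer => PySem.Str.isIn s longer) then kept else kept ++ [s]

-- the filter condition, assembled from its two parts
theorem pvCond {s u : String} (hne : s ≠ u) (hin : PySem.Str.isIn s u = true) :
    (s != u && PySem.Str.isIn s u) = true := by
  rw [Bool.and_eq_true]
  exact ⟨bne_iff_ne.mpr hne, hin⟩

-- a proper substring is strictly shorter
theorem pvLenLt {s u : String} (hne : s ≠ u) (hin : PySem.Str.isIn s u = true) :
    PySem.Str.len s < PySem.Str.len u := by
  rw [PySem.Str.isIn_iff_infix] at hin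
  rcases lt_or_eq_of_le hin.length_le with h | h
  · rw [PySem.Str.len_eq, PySem.Str.len_eq]
    exact_mod_cast h
  · exact absurd (String.toList_inj.1 (hin.eq_of_length h)) hne

theorem pvPb_false (L : List String) (t : String) (h : pvPb L t = false) :
    ∃ u ∈ L, t ≠ u ∧ PySem.Str.isIn t u = true := by
  unfold pvPb at h
  rw [Bool.not_eq_false', List.any_eq_true] at h
  rcases h with ⟨u, hu, hcond⟩
  rw [Bool.and_eq_true] at hcond
  exact ⟨u, hu, bne_iff_ne.mp hcond.1, hcond.2⟩

-- every pruned-away string is a substring of some strictly longer MAXIMAL string of L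
theorem pvMaximalSuper (L : List String) (s : String) (hPb : pvPb L s = false) :
    ∃ w ∈ L, PySem.Str.len s < PySem.Str.len w ∧
      PySem.Str.isIn s w = true ∧ pvPb L w = true := by
  classical
  rcases pvPb_false L s hPb with ⟨u, hu, hne, hin⟩
  set M := L.filter (fun u => s != u && PySem.Str.isIn s u) with hM
  have huM : u ∈ M := by
    rw [hM, List.mem_filter]
    exact ⟨hu, pvCond hne hin⟩
  rcases hw : List.argmax PySem.Str.len M with _ | w
  · exact absurd (List.argmax_eq_none.1 hw ▸ huM) (List.not_mem_nil)
  · have hwM : w ∈ M := List.argmax_mem hw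
    rw [hM, List.mem_filter] at hwM
    rcases hwM with ⟨hwL, hwcond⟩
    rw [Bool.and_eq_true] at hwcond
    have hsw : s ≠ w := bne_iff_ne.mp hwcond.1
    have hinsw : PySem.Str.isIn s w = true := hwcond.2
    have hlt : PySem.Str.len s < PySem.Str.len w := pvLenLt hsw hinsw
    refine ⟨w, hwL, hlt, hinsw, ?_⟩
    by_contra hPbw
    rcases pvPb_false L w (Bool.not_eq_true _ ▸ hPbw) with ⟨v, hvL, hwv, hinwv⟩
    have hltv : PySem.Str.len w < PySem.Str.len v := pvLenLt hwv hinwv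
    have hinsv : PySem.Str.isIn s v = true := by
      rw [PySem.Str.isIn_iff_infix] at hinsw hinwv ⊢
      exact hinsw.trans hinwv
    have hsv : s ≠ v := by
      intro hEq; rw [hEq] at hlt; exact absurd (hlt.trans hltv) (lt_irrefl _)
    have hvM : v ∈ M := by
      rw [hM, List.mem_filter]
      exact ⟨hvL, pvCond hsv hinsv⟩
    exact absurd hltv (List.not_lt_of_mem_argmax hvM hw)

-- A's pruning loop computes exactly the maximal elements, in order
theorem pvKeepFold (L : List String) (hnd : L.Nodup)
    (hsort : L.Pairwise (fun a b => PySem.Str.len b ≤ PySem.Str.len a)) :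
    ∀ suf pre, pre ++ suf = L →
      suf.foldl pvStepK (pre.filter (pvPb L)) = L.filter (pvPb L) := by
  intro suf
  induction suf with
  | nil =>
    intro pre h
    rw [List.foldl_nil, ← h, List.append_nil]
  | cons s suf ih =>
    intro pre h
    have hsL : s ∈ L := by rw [← h]; exact List.mem_append_right _ (List.mem_cons_self)
    have hstep : pvStepK (pre.filter (pvPb L)) s = (pre ++ [s]).filter (pvPb L) := by
      unfold pvStepK
      cases hany : (pre.filter (pvPb L)).any (fun longer => PySem.Str.isIn s longer) with
      | true =>
        rcases List.any_eq_true.1 hany with ⟨longer, hlmem, hlin⟩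
        rw [List.mem_filter] at hlmem
        have hne : s ≠ longer := by
          intro hEq
          have hdisj := List.disjoint_of_nodup_append (h ▸ hnd)
          exact hdisj (hEq ▸ hlmem.1) (List.mem_cons_self)
        have hPbs : pvPb L s = false := by
          unfold pvPb
          rw [Bool.not_eq_false', List.any_eq_true]
          exact ⟨longer, by rw [← h]; exact List.mem_append_left _ hlmem.1,
            pvCond hne hlin⟩
        simp [List.filter_append, hPbs]
      | false =>
        have hPbs : pvPb L s = true := by
          by_contra hc
          rcases pvMaximalSuper L s (Bool.not_eq_true _ ▸ hc) with ⟨w, hwL, hlt, hin, hPbw⟩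
          have hwpre : w ∈ pre := by
            rw [← h] at hwL
            rcases List.mem_append.1 hwL with h' | h'
            · exact h'
            · rcases List.mem_cons.1 h' with h'' | h''
              · rw [h''] at hlt; exact absurd hlt (lt_irrefl _)
              · -- w after s in the sorted list: len w ≤ len s, contradiction
                have hp := (List.pairwise_append.1 (h ▸ hsort)).2.1
                have := (List.pairwise_cons.1 hp).1 w h''
                exact absurd hlt (not_lt_of_ge this)
          have : (pre.filter (pvPb L)).any (fun longer => PySem.Str.isIn s longer) = true :=
            List.any_eq_true.2 ⟨w, List.mem_filter.2 ⟨hwpre, hPbw⟩, hin⟩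
          rw [this] at hany; exact Bool.noConfusion hany
        simp [List.filter_append, hPbs]
    rw [List.foldl_cons, hstep, ih (pre ++ [s]) (by rw [List.append_assoc]; exact h)]

-- inserting a key's current value back is a no-op
theorem pvInsertGetDSelf {ν : Type} (d : PySem.Dict String ν) (k : String) (v0 : ν)
    (hc : d.contains k = true) (hnd : d.keys.Nodup) :
    d.insert k (d.getD k v0) = d := by
  apply PySem.Dict.ext
  rw [PySem.Dict.items_insert_of_contains _ _ hc]
  have : ∀ p ∈ d.items, (if (p.1 == k) = true then (k, d.getD k v0) else p) = p := by
    intro p hp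
    split
    case isTrue hpk =>
      have hpk' : p.1 = k := by simpa using hpk
      have : (k, p.2) ∈ d.items := by rw [← hpk']; exact hp
      rw [PySem.Dict.getD_of_mem_items d this hnd v0, ← hpk']
    case isFalse => rfl
  rw [List.map_congr_left this]
  exact List.map_id' _

-- a fold that re-inserts each key's (already sorted) value changes nothing
theorem pvFoldInsertSorted (ks : List String) (d : PySem.Dict String (List String))
    (hnd : d.keys.Nodup)
    (h : ∀ k ∈ ks, d.contains k = true ∧
      PySem.List.sorted (d.getD k []) PySem.Str.len true = d.getD k []) :
    ks.foldl (fun d l => d.insert l (PySem.List.sorted (d.getD l []) PySem.Str.len true)) d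
      = d := by
  induction ks with
  | nil => rfl
  | cons k ks ih =>
    rw [List.foldl_cons, (h k (List.mem_cons_self)).2,
      pvInsertGetDSelf d k [] (h k (List.mem_cons_self)).1 hnd]
    exact ih (fun k' hk' => h k' (List.mem_cons_of_mem _ hk'))

-- updating a set with elements it already has is a no-op
theorem pvSetUpdateSelf (s : PySem.Set String) (xs : List String)
    (h : ∀ x ∈ xs, x ∈ s) : PySem.Set.update s xs = s := by
  rw [PySem.Set.update_eq_append_filter]
  have : List.filter (fun y => !s.contains y) (PySem.Set.ofList xs) = [] := by
    rw [List.filter_eq_nil_iff]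
    intro y hy
    have hmem : y ∈ s := h y ((PySem.Set.mem_ofList xs y).1 hy)
    simp [hmem]
  rw [this, List.append_nil]

-- the assembled equivalence
theorem pvMain (text : String) (pairs : List (String × String))
    (hpre : ∀ p ∈ pairs, PySem.Str.isIn p.1 text = true → p.2 ∈ pvLEVELS) :
    match_presence_pruned_py text pairs = match_presence_pruned_py_alt text pairs := by
  simp only [match_presence_pruned_py, match_presence_pruned_py_alt, pvStep_eq]
  set best := pairs.foldl (pvBestStepB text) PySem.Dict.empty with hbest
  set L := PySem.List.sorted best.keys PySem.Str.len true with hL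
  have hndK : best.keys.Nodup := pvNodupKeysB text pairs _ PySem.Dict.nodup_keys_empty
  have hndL : L.Nodup := ((PySem.List.sorted_perm best.keys PySem.Str.len true).nodup_iff).2 hndK
  have hsort : L.Pairwise (fun a b => PySem.Str.len b ≤ PySem.Str.len a) :=
    PySem.List.sorted_pairwise_rev best.keys PySem.Str.len
  have hlvl : ∀ t ∈ L, best.getD t "" ∈ pvLEVELS := by
    intro t ht
    have htk : t ∈ best.keys := (PySem.List.mem_sorted _ _ _ _).1 ht
    have hc : best.contains t = true := (PySem.Dict.contains_iff_mem_keys best t).2 htk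
    rw [PySem.Dict.contains_eq_isSome_get?] at hc
    rcases Option.isSome_iff_exists.1 hc with ⟨v, hv⟩
    rw [PySem.Dict.getD_eq_get?_getD, hv]
    exact pvLevelsB text pairs PySem.Dict.empty hpre (by intro t l h; rw [PySem.Dict.get?_empty] at h; cases h) t v hv
  have hPbEq : (fun t => !(L.any (fun u => t != u && PySem.Str.isIn t u))) = pvPb L := rfl
  rw [hPbEq]
  have hkept : pvKeepLongestNonSubstrings best.keys = L.filter (pvPb L) :=
    pvKeepFold L hndL hsort L [] rfl
  rw [hkept]
  set kept := L.filter (pvPb L) with hkeptdef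
  have hmemkept : ∀ t ∈ kept, t ∈ L := fun t ht => (List.mem_filter.1 ht).1
  have hkpw : kept.Pairwise (fun a b => PySem.Str.len b ≤ PySem.Str.len a) :=
    List.Pairwise.sublist (List.filter_sublist) hsort
  -- split the two-dict loop
  rw [PySem.List.foldl_prod_mk
    (fun (c : PySem.Dict String Int) t => c.modify (best.getD t "") 0 (fun x => x + 1))
    (fun (b : PySem.Dict String (List String)) t => b.modify (best.getD t "") [] (fun x => x ++ [t]))
    kept _ _]
  set counts0 : PySem.Dict String Int := pvLEVELS.foldl (fun d l => d.insert l 0) PySem.Dict.empty with hc0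
  set byLevel0 : PySem.Dict String (List String) := pvLEVELS.foldl (fun d l => d.insert l []) PySem.Dict.empty with hb0
  set counts1 := kept.foldl (fun (c : PySem.Dict String Int) t => c.modify (best.getD t "") 0 (fun x => x + 1)) counts0 with hc1
  set byLevel1 := kept.foldl (fun (b : PySem.Dict String (List String)) t => b.modify (best.getD t "") [] (fun x => x ++ [t])) byLevel0 with hb1
  have hc0keys : counts0.keys = pvLEVELS := by rw [hc0]; decide
  have hb0keys : byLevel0.keys = pvLEVELS := by rw [hb0]; decide
  have hndLV : pvLEVELS.Nodup := by decide
  have hmaplvl : ∀ x ∈ kept.map (fun t => best.getD t ""), x ∈ pvLEVELS := by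
    intro x hx
    rcases List.mem_map.1 hx with ⟨t, ht, rfl⟩
    exact hlvl t (hmemkept t ht)
  have hkeys1 : counts1.keys = pvLEVELS := by
    rw [hc1, PySem.Dict.keys_foldl_modify_key kept (fun t => best.getD t "") 0
      (fun _ _ => (fun x => x + 1)) counts0, hc0keys]
    exact pvSetUpdateSelf _ _ hmaplvl
  have hkeys2 : byLevel1.keys = pvLEVELS := by
    rw [hb1, PySem.Dict.keys_foldl_modify_key kept (fun t => best.getD t "") []
      (fun _ t => (fun x => x ++ [t])) byLevel0, hb0keys]
    exact pvSetUpdateSelf _ _ hmaplvl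
  have hnd1 : counts1.keys.Nodup := by rw [hkeys1]; exact hndLV
  have hnd2 : byLevel1.keys.Nodup := by rw [hkeys2]; exact hndLV
  -- values of counts1
  have hfm1 : counts1 = (kept.map (fun t => best.getD t "")).foldl
      (fun d x => d.modify x 0 (fun v => v + 1)) counts0 :=
    (List.foldl_map (f := fun t => best.getD t "")
      (g := fun (d : PySem.Dict String Int) x => d.modify x 0 (fun v => v + 1))).symm
  have hgetD1 : ∀ l ∈ pvLEVELS, counts1.getD l 0 =
      ((kept.filter (fun t => best.getD t "" == l)).length : Int) := by
    intro l hl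
    rw [hfm1, PySem.Dict.getD_foldl_modify_add_one]
    have h0 : counts0.getD l 0 = 0 := by
      rw [hc0]; fin_cases hl <;> decide
    rw [h0, List.count_eq_countP, List.countP_map, List.countP_eq_length_filter]
    have hcomp : ((fun x => x == l) ∘ fun t => best.getD t "") = (fun t => best.getD t "" == l) := rfl
    rw [hcomp, zero_add]
  -- values of byLevel1
  have hfm2 : byLevel1 = (kept.map (fun t => (best.getD t "", t))).foldl
      (fun d p => d.modify p.1 [] (fun x => x ++ [p.2])) byLevel0 :=
    (List.foldl_map (f := fun t => (best.getD t "", t))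
      (g := fun (d : PySem.Dict String (List String)) p => d.modify p.1 [] (fun x => x ++ [p.2]))).symm
  have hgetD2 : ∀ l ∈ pvLEVELS, byLevel1.getD l [] =
      kept.filter (fun t => best.getD t "" == l) := by
    intro l hl
    rw [hfm2, PySem.Dict.getD_foldl_modify_append]
    have h0 : byLevel0.getD l [] = [] := by
      rw [hb0]; fin_cases hl <;> decide
    rw [h0, List.filter_map, List.map_map, List.nil_append]
    have hcomp1 : ((fun p => p.1 == l) ∘ fun t => ((best.getD t "", t) : String × String)) = (fun t => best.getD t "" == l) := rfl
    have hcomp2 : ((fun x => x.2) ∘ fun t => ((best.getD t "", t) : String × String)) = (fun t => t) := rfl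
    rw [hcomp1, hcomp2]
    exact List.map_id' _
  -- the per-level re-sort is the identity
  have hresort : pvLEVELS.foldl
      (fun d l => d.insert l (PySem.List.sorted (d.getD l []) PySem.Str.len true)) byLevel1
      = byLevel1 := by
    refine pvFoldInsertSorted pvLEVELS byLevel1 hnd2 ?_
    intro k hk
    constructor
    · rw [PySem.Dict.contains_iff_mem_keys, hkeys2]; exact hk
    · rw [hgetD2 k hk]
      exact PySem.List.sorted_rev_eq_self_of_pairwise _ _
        (List.Pairwise.sublist (List.filter_sublist) hkpw)
  rw [hresort]
  -- items of both dicts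
  have hitems1 : counts1.items = pvLEVELS.map (fun l => (l, counts1.getD l 0)) := by
    rw [PySem.Dict.items_eq_map_keys counts1 hnd1 0, hkeys1]
  have hitems2 : byLevel1.items = pvLEVELS.map (fun l => (l, byLevel1.getD l [])) := by
    rw [PySem.Dict.items_eq_map_keys byLevel1 hnd2 [], hkeys2]
  rw [hitems1, hitems2]
  simp only [List.map_map, Prod.mk.injEq]
  constructor
  · refine List.map_congr_left ?_
    intro l hl
    simp [hgetD1 l hl]
  · refine List.map_congr_left ?_
    intro l hl
    simp [hgetD2 l hl]

-- ===== VERDICT (by name: the statement is the Claim_ definition above) =====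
theorem match_presence_pruned_py_spec : Claim_equal_match_presence_pruned_py := by
  intro text pairs _hdom hpre
  unfold Spec_match_presence_pruned_py
  exact pvMain text pairs hpre
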